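-- pv_equiv track=rewrite | github.com/snehakumbhare/python-A | DataType160.py | remove_items_con
-- ===== SOURCE A (Python) =====
-- def condition_match(x):
--     return ((x % 2) == 0)
--
-- def remove_items_con(data, N):
--     # Initialize a counter variable 'ctr' to 1.
--     ctr = 1
--
--     # Create an empty list called 'result' to store the filtered elements.
--     result = []
--
--     # Iterate through the elements 'x' in the 'data' list.
--     for x in data:
--         # Check if the counter 'ctr' is greater than 'N' or if 'x' does not meet the condition of being even.
--         if ctr > N or not condition_match(x):
--             # If the condition is met, add 'x' to the 'result' list.
--             result.append(x)
--         else: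
--             # If the condition is not met, increment the counter 'ctr' by 1.
--             ctr = ctr + 1
--
--     # Return the 'result' list containing elements that meet the filtering criteria.
--     return result
-- ===== SOURCE B (Python) =====
-- def remove_items_con(data, N):
--     # Pass 1: collect the indices of the first N even elements into a set.
--     drop_idx = set()
--     for i, x in enumerate(data):
--         if len(drop_idx) >= N:
--             break
--         if x % 2 == 0:
--             drop_idx.add(i)
--     # Pass 2: keep every element whose index was not collected.
--     return [x for i, x in enumerate(data) if i not in drop_idx]
-- ===== Notes on version B (the rewrite author's own statement) =====
-- stated objective: alternative
-- what changed: Replaces A's single pass with a fused counter/append by two passes: first collect the set of indices of the first N even elements, then keep every element whose index is not in that set.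
import Mathlib
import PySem

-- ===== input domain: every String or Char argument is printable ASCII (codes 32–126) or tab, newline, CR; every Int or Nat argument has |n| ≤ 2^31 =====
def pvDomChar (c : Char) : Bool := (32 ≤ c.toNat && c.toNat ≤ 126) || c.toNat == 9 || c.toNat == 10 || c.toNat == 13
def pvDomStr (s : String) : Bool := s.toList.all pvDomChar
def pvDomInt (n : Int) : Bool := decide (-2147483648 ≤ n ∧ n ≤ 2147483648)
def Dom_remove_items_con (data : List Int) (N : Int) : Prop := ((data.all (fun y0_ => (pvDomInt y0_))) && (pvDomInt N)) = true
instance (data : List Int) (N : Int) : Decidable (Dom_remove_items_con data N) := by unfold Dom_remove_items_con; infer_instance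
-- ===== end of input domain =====

-- B replaces A's fused counter/append pass by two passes: collect the index set of the
-- first N evens, then keep the elements whose index is not in it; alternative, same O(n).

-- ===== PORT A =====
-- condition_match(x): x % 2 == 0
def condition_match (x : Int) : Bool := PySem.Int.mod x 2 == 0

-- A's loop: state is the counter ctr; result is built by the structural recursion.
def remove_items_con_go (N : Int) : List Int → Int → List Int
  | [], _ => []
  | x :: xs, ctr =>
      if decide (ctr > N) || !condition_match x then x :: remove_items_con_go N xs ctr
      else remove_items_con_go N xs (ctr + 1)

def remove_items_con (data : List Int) (N : Int) : List Int :=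
  remove_items_con_go N data 1

-- ===== PORT B =====
-- Source B's first loop: walk enumerate(data), break once the set holds N indices,
-- add the index of each even element.
def collectDrop (N : Int) : List (Int × Int) → PySem.Set Int → PySem.Set Int
  | [], s => s
  | (i, x) :: rest, s =>
      if decide (PySem.Set.len s ≥ N) then s
      else if PySem.Int.mod x 2 == 0 then collectDrop N rest (PySem.Set.add s i)
      else collectDrop N rest s

-- Source B's second pass: the comprehension over enumerate(data) filtering on membership.
def remove_items_con_alt (data : List Int) (N : Int) : List Int :=
  let drop_idx := collectDrop N (PySem.List.enumerate data) PySem.Set.empty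
  (PySem.List.enumerate data).filterMap
    (fun p => if PySem.Set.contains drop_idx p.1 then none else some p.2)

-- ===== PRECONDITION & SPEC =====
def Spec_remove_items_con (data : List Int) (N : Int) (out : List Int) : Prop := out = remove_items_con_alt data N
instance (data : List Int) (N : Int) (out : List Int) : Decidable (Spec_remove_items_con data N out) := by unfold Spec_remove_items_con; infer_instance

-- ===== CLAIM (what is proved, stated in full; the proofs are below) =====
def Claim_equal_remove_items_con : Prop := ∀ (data : List Int) (N : Int), Dom_remove_items_con data N → Spec_remove_items_con data N (remove_items_con data N)

-- ===== LEMMAS AND PROOFS =====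

-- Reference function: drop the first k even elements.
def dropEvens : Nat → List Int → List Int
  | _, [] => []
  | 0, l => l
  | k + 1, x :: xs =>
      if condition_match x then dropEvens k xs else x :: dropEvens (k + 1) xs

theorem dropEvens_zero (l : List Int) : dropEvens 0 l = l := by
  cases l <;> simp [dropEvens]

theorem remove_items_con_go_eq (N : Int) (data : List Int) :
    ∀ ctr : Int, remove_items_con_go N data ctr = dropEvens (N - ctr + 1).toNat data := by
  induction data with
  | nil => intro ctr; simp [remove_items_con_go, dropEvens]
  | cons x xs ih =>
    intro ctr
    by_cases hc : ctr > N
    · have h0 : (N - ctr + 1).toNat = 0 := by omega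
      simp [remove_items_con_go, hc, h0, dropEvens_zero, ih]
    · have hk : (N - ctr + 1).toNat = (N - ctr).toNat + 1 := by omega
      have hk' : (N - (ctr + 1) + 1).toNat = (N - ctr).toNat := by omega
      by_cases he : condition_match x
      · simp [remove_items_con_go, hc, he, hk, dropEvens, ih, hk']
      · simp [remove_items_con_go, hc, he, hk, dropEvens, ih]

theorem collectDrop_cons (N i x : Int) (rest : List (Int × Int)) (s : PySem.Set Int) :
    collectDrop N ((i, x) :: rest) s =
      if N ≤ (s.length : Int) then s
      else if (2 : Int) ∣ x then collectDrop N rest (PySem.Set.add s i)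
      else collectDrop N rest s := by
  simp [collectDrop, ge_iff_le]

theorem mem_collectDrop_of_mem (N : Int) (l : List (Int × Int)) :
    ∀ (s : PySem.Set Int) (m : Int), m ∈ s → m ∈ collectDrop N l s := by
  induction l with
  | nil => intro s m hm; simpa [collectDrop] using hm
  | cons p rest ih =>
    intro s m hm
    obtain ⟨i, x⟩ := p
    rw [collectDrop_cons]
    by_cases hb : N ≤ (s.length : Int)
    · simpa [hb] using hm
    · by_cases he : (2 : Int) ∣ x
      · simpa [hb, he] using ih (PySem.Set.add s i) m (by simp [PySem.Set.mem_add, hm])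
      · simpa [hb, he] using ih s m hm

theorem mem_collectDrop (N : Int) (l : List (Int × Int)) :
    ∀ (s : PySem.Set Int) (m : Int), m ∈ collectDrop N l s → m ∈ s ∨ ∃ x, (m, x) ∈ l := by
  induction l with
  | nil => intro s m hm; exact Or.inl (by simpa [collectDrop] using hm)
  | cons p rest ih =>
    intro s m hm
    obtain ⟨i, x⟩ := p
    rw [collectDrop_cons] at hm
    by_cases hb : N ≤ (s.length : Int)
    · exact Or.inl (by simpa [hb] using hm)
    · by_cases he : (2 : Int) ∣ x
      · rcases ih (PySem.Set.add s i) m (by simpa [hb, he] using hm) with h | ⟨y, hy⟩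
        · rcases (PySem.Set.mem_add _ _ _).mp h with h' | h'
          · exact Or.inl h'
          · exact Or.inr ⟨x, by simp [h']⟩
        · exact Or.inr ⟨y, by simp [hy]⟩
      · rcases ih s m (by simpa [hb, he] using hm) with h | ⟨y, hy⟩
        · exact Or.inl h
        · exact Or.inr ⟨y, by simp [hy]⟩

theorem collectDrop_main (N : Int) :
    ∀ (xs : List Int) (j : Int) (s : PySem.Set Int), (∀ m ∈ s, m < j) →
      (PySem.List.enumerate xs j).filterMap
          (fun p => if PySem.Set.contains (collectDrop N (PySem.List.enumerate xs j) s) p.1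
                    then none else some p.2)
        = dropEvens (N - s.length).toNat xs := by
  intro xs
  induction xs with
  | nil => intro j s _; simp [PySem.List.enumerate_nil, dropEvens]
  | cons x xs ih =>
    intro j s hs
    rw [PySem.List.enumerate_cons, collectDrop_cons]
    by_cases hb : N ≤ (s.length : Int)
    · -- break: the set stays s, nothing with index ≥ j is in it, everything is kept
      have hk : (N - s.length).toNat = 0 := by omega
      rw [if_pos hb, hk, dropEvens_zero]
      have hall : ∀ p ∈ (j, x) :: PySem.List.enumerate xs (j + 1),
          PySem.Set.contains s p.1 = false := by
        intro p hp
        rw [Bool.eq_false_iff]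
        intro hcon
        have hpm : p.1 ∈ s := by simpa [PySem.Set.contains_iff] using hcon
        have hplt := hs _ hpm
        rcases List.mem_cons.mp hp with rfl | hp'
        · omega
        · have : ∃ (k : Nat) (_ : k < xs.length), p = (j + 1 + (k : Int), xs[k]) := by
            simpa [PySem.List.mem_enumerate_iff] using hp'
          obtain ⟨k, _, rfl⟩ := this
          simp at hplt
          omega
      rw [List.filterMap_congr (fun p hp => by rw [hall p hp])]
      simp only [Bool.false_eq_true, if_false]
      rw [show (fun (p : Int × Int) => some p.2) = some ∘ Prod.snd from rfl,
         List.filterMap_eq_map, List.map_cons]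
      have hmap := PySem.List.map_snd_enumerate (xs := xs) (s := j + 1)
      simp only [List.cons.injEq]
      constructor
      · trivial
      · simpa using hmap
    · have hknz : (N - s.length).toNat = (N - s.length - 1).toNat + 1 := by omega
      rw [if_neg hb]
      by_cases he : (2 : Int) ∣ x
      · -- even head: its index j goes into the set, the element is dropped
        have hjnots : j ∉ s := fun h => absurd (hs j h) (by omega)
        rw [if_pos he]
        have hmem : j ∈ collectDrop N (PySem.List.enumerate xs (j + 1)) (PySem.Set.add s j) :=
          mem_collectDrop_of_mem N _ _ j (by simp [PySem.Set.mem_add])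
        have hlen : (PySem.Set.add s j).length = s.length + 1 := by
          rw [PySem.Set.add_of_not_mem hjnots]; simp
        have hcond : condition_match x = true := by
          simp [condition_match, he]
        rw [List.filterMap_cons]
        have hcj : PySem.Set.contains
            (collectDrop N (PySem.List.enumerate xs (j + 1)) (PySem.Set.add s j)) j = true := by
          simpa [PySem.Set.contains_iff] using hmem
        rw [hcj]
        simp only [if_true]
        rw [ih (j + 1) (PySem.Set.add s j)
              (fun m hm => by rcases (PySem.Set.mem_add _ _ _).mp hm with h | rfl
                              · have := hs m h; omega
                              · omega)]
        rw [hknz, hlen]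
        simp only [dropEvens, hcond, if_true]
        congr 2
        omega
      · -- odd head: the set is untouched, j is never collected, the element is kept
        rw [if_neg he]
        have hcond : condition_match x = false := by
          simp [condition_match, he]
        rw [List.filterMap_cons]
        have hnotmem : j ∉ collectDrop N (PySem.List.enumerate xs (j + 1)) s := by
          intro hmem
          rcases mem_collectDrop N _ _ _ hmem with h | ⟨y, hy⟩
          · exact absurd (hs j h) (by omega)
          · have : ∃ (k : Nat) (_ : k < xs.length), ((j : Int), y) = (j + 1 + (k : Int), xs[k]) := by
              simpa [PySem.List.mem_enumerate_iff] using hy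
            obtain ⟨k, _, hpk⟩ := this
            have : (j : Int) = j + 1 + (k : Int) := congrArg Prod.fst hpk
            omega
        have hcj : PySem.Set.contains
            (collectDrop N (PySem.List.enumerate xs (j + 1)) s) j = false := by
          rw [Bool.eq_false_iff]
          intro hcon
          exact hnotmem (by simpa [PySem.Set.contains_iff] using hcon)
        rw [hcj]
        simp only [Bool.false_eq_true, if_false]
        rw [ih (j + 1) s (fun m hm => by have := hs m hm; omega)]
        rw [hknz]
        simp only [dropEvens, hcond, Bool.false_eq_true, if_false]


theorem remove_items_con_alt_eq (data : List Int) (N : Int) :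
    remove_items_con_alt data N = dropEvens N.toNat data := by
  unfold remove_items_con_alt
  have := collectDrop_main N data 0 PySem.Set.empty (by intro m hm; simp [PySem.Set.empty] at hm)
  simpa [PySem.Set.empty] using this

-- ===== VERDICT (by name: the statement is the Claim_ definition above) =====
theorem remove_items_con_spec : Claim_equal_remove_items_con := by
  intro data N _
  unfold Spec_remove_items_con remove_items_con
  rw [remove_items_con_go_eq, remove_items_con_alt_eq]
  congr 1
  omega
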